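-- pv_equiv track=rewrite | github.com/yejinleee/CoRanDe | Week1/지연/1802_jiyeon.py | solve
-- ===== SOURCE A (Python) =====
-- def solve(paper):
--     if len(paper) <= 1:
--         return True
--
--     flag = True
--     mid = len(paper) //2
--     for i in range(mid):
--         if paper[i] == paper[-(i+1)]:
--             flag = False
--             break
--
--     if flag:
--         return solve(paper[:mid]) and solve(paper[mid+1:])
--     else:
--         return False
-- ===== SOURCE B (Python) =====
-- def solve(paper):
--     # Iterative divide-and-conquer: explicit stack of half-open index ranges,
--     # no recursion and no slice copies.
--     stack = [(0, len(paper))]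
--     while stack:
--         lo, hi = stack.pop()
--         if hi - lo <= 1:
--             continue
--         mid = (hi - lo) // 2
--         for i in range(mid):
--             if paper[lo + i] == paper[hi - 1 - i]:
--                 return False
--         stack.append((lo, lo + mid))
--         stack.append((lo + mid + 1, hi))
--     return True
-- ===== Notes on version B (the rewrite author's own statement) =====
-- stated objective: alternative
-- what changed: Replaces the recursive slice-and-recurse check with an iterative worklist of (lo,hi) index ranges that compares characters in place, eliminating both recursion and slice copying.
import Mathlib
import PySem

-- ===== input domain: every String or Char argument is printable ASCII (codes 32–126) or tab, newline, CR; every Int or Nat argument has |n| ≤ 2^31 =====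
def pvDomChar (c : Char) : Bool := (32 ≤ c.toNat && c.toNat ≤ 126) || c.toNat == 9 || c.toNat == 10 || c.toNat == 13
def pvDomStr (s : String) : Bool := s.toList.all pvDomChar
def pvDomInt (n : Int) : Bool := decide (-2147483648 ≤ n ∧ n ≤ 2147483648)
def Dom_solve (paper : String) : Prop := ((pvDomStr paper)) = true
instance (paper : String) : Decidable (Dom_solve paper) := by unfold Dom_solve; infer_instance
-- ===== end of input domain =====

-- B replaces A's recursive slicing with an iterative worklist of index ranges; objective: alternative decomposition.

-- ===== PORT A =====
-- the for-loop 'for i in range(mid): if paper[i] == paper[-(i+1)]: flag=False; break':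
-- returns the final value of flag.  paper[i] (0 ≤ i < mid ≤ len) is l.getD i;
-- paper[-(i+1)] (in range since i+1 ≤ len) is the element at index len-1-i — exact here.
def solveFlag (l : List Char) (mid : Nat) (i : Nat) : Bool :=
  if i < mid then
    if l.getD i ' ' == l.getD (l.length - 1 - i) ' ' then false
    else solveFlag l mid (i + 1)
  else true
termination_by mid - i

-- paper[:mid] with 0 ≤ mid ≤ len is l.take mid; paper[mid+1:] is l.drop (mid+1) — exact for these in-range nonnegative bounds.
def solveA (l : List Char) : Bool :=
  if l.length ≤ 1 then true
  else
    let mid := l.length / 2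
    let flag := solveFlag l mid 0
    if flag then solveA (l.take mid) && solveA (l.drop (mid + 1))
    else false
termination_by l.length
decreasing_by
  · simp [List.length_take]; omega
  · simp [List.length_drop]; omega

def solve (paper : String) : Bool := solveA paper.toList

-- ===== PORT B =====
-- the inner 'for i in range(mid)': true iff some equal mirror pair is found (then B returns False).
def bScan (cs : List Char) (lo hi mid : Nat) (i : Nat) : Bool :=
  if i < mid then
    if cs.getD (lo + i) ' ' == cs.getD (hi - 1 - i) ' ' then true
    else bScan cs lo hi mid (i + 1)
  else false
termination_by mid - i

-- the while-loop over the explicit stack (head = top of the Python stack).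
def bLoop (cs : List Char) (stack : List (Nat × Nat)) : Bool :=
  match stack with
  | [] => true
  | (lo, hi) :: rest =>
    if hi - lo ≤ 1 then bLoop cs rest
    else
      let mid := (hi - lo) / 2
      if bScan cs lo hi mid 0 then false
      else bLoop cs ((lo + mid + 1, hi) :: (lo, lo + mid) :: rest)
termination_by (stack.map (fun p => 2 * (p.2 - p.1))).sum + stack.length
decreasing_by
  · simp; omega
  · simp; omega

def solve_alt (paper : String) : Bool := bLoop paper.toList [(0, paper.toList.length)]

-- ===== PRECONDITION & SPEC =====
def Spec_solve (paper : String) (out : Bool) : Prop := out = solve_alt paper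
instance (paper : String) (out : Bool) : Decidable (Spec_solve paper out) := by unfold Spec_solve; infer_instance

-- ===== CLAIM (what is proved, stated in full; the proofs are below) =====
def Claim_equal_solve : Prop := ∀ (paper : String), Dom_solve paper → Spec_solve paper (solve paper)

-- ===== LEMMAS AND PROOFS =====

-- the sub-list of cs described by the half-open range [lo, hi)
def sub (cs : List Char) (lo hi : Nat) : List Char := (cs.drop lo).take (hi - lo)

theorem length_sub (cs : List Char) (lo hi : Nat) (h : hi ≤ cs.length) :
    (sub cs lo hi).length = hi - lo := by
  simp [sub]; omega

theorem getD_sub (cs : List Char) (lo hi i : Nat) (_h : hi ≤ cs.length) (hi' : i < hi - lo) :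
    (sub cs lo hi).getD i ' ' = cs.getD (lo + i) ' ' := by
  simp [sub, List.getD_eq_getElem?_getD, List.getElem?_drop, hi']

theorem take_sub (cs : List Char) (lo hi mid : Nat) (hm : mid ≤ hi - lo) :
    (sub cs lo hi).take mid = sub cs lo (lo + mid) := by
  simp [sub, List.take_take]
  omega

theorem drop_sub (cs : List Char) (lo hi mid : Nat) :
    (sub cs lo hi).drop (mid + 1) = sub cs (lo + mid + 1) hi := by
  simp [sub, List.drop_take, List.drop_drop]
  congr 1
  omega

theorem flag_eq_bScan (cs : List Char) (lo hi mid : Nat) (h : hi ≤ cs.length)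
    (hm : mid ≤ hi - lo) : ∀ i, solveFlag (sub cs lo hi) mid i = !bScan cs lo hi mid i := by
  intro i
  fun_induction bScan cs lo hi mid i with
  | case1 i hlt heq =>
      have h1 : (sub cs lo hi).getD i ' ' = cs.getD (lo + i) ' ' :=
        getD_sub cs lo hi i h (by omega)
      have h2 : (sub cs lo hi).getD ((sub cs lo hi).length - 1 - i) ' '
          = cs.getD (hi - 1 - i) ' ' := by
        rw [length_sub cs lo hi h]
        have := getD_sub cs lo hi (hi - lo - 1 - i) h (by omega)
        rw [this]; congr 1; omega
      rw [solveFlag.eq_def, h1, h2]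
      simp at heq
      simp [hlt, heq]
  | case2 i hlt heq ih =>
      have h1 : (sub cs lo hi).getD i ' ' = cs.getD (lo + i) ' ' :=
        getD_sub cs lo hi i h (by omega)
      have h2 : (sub cs lo hi).getD ((sub cs lo hi).length - 1 - i) ' '
          = cs.getD (hi - 1 - i) ' ' := by
        rw [length_sub cs lo hi h]
        have := getD_sub cs lo hi (hi - lo - 1 - i) h (by omega)
        rw [this]; congr 1; omega
      rw [solveFlag.eq_def, h1, h2]
      simp at heq
      simp [hlt, heq, ih]
  | case3 i hge => rw [solveFlag.eq_def]; simp [hge]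

theorem bLoop_eq_all (cs : List Char) (stack : List (Nat × Nat))
    (hinv : ∀ r ∈ stack, r.1 ≤ r.2 ∧ r.2 ≤ cs.length) :
    bLoop cs stack = stack.all (fun r => solveA (sub cs r.1 r.2)) := by
  fun_induction bLoop cs stack with
  | case1 => simp
  | case2 lo hi rest hle ih =>
      have hr := hinv (lo, hi) (by simp)
      have hsm : solveA (sub cs lo hi) = true := by
        rw [solveA]
        simp [length_sub cs lo hi hr.2]
        omega
      simp only [List.all_cons, hsm, Bool.true_and]
      exact ih (fun r hr' => hinv r (by simp [hr']))
  | case3 lo hi rest hgt mid hscan =>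
      have hr := hinv (lo, hi) (by simp)
      have hmd : mid = (hi - lo) / 2 := rfl
      have hsm : solveA (sub cs lo hi) = false := by
        rw [solveA]
        rw [length_sub cs lo hi hr.2]
        have hgt' : ¬ hi - lo ≤ 1 := hgt
        simp only [hgt', if_false]
        rw [flag_eq_bScan cs lo hi ((hi - lo) / 2) hr.2 (by omega) 0, ← hmd, hscan]
        simp
      simp [hsm]
  | case4 lo hi rest hgt mid hscan ih =>
      have hr := hinv (lo, hi) (by simp)
      have hmd : mid = (hi - lo) / 2 := rfl
      have hmid : mid ≤ hi - lo := by omega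
      have hinv' : ∀ r ∈ ((lo + mid + 1, hi) :: (lo, lo + mid) :: rest),
          r.1 ≤ r.2 ∧ r.2 ≤ cs.length := by
        intro r hr'
        simp at hr'
        rcases hr' with h1 | h2 | h3
        · subst h1; constructor <;> [omega; exact hr.2]
        · subst h2; constructor <;> omega
        · exact hinv r (by simp [h3])
      have hb : bScan cs lo hi mid 0 = false := by
        cases hb : bScan cs lo hi mid 0
        · rfl
        · exact absurd hb hscan
      have hsm : solveA (sub cs lo hi)
          = (solveA (sub cs lo (lo + mid))
             && solveA (sub cs (lo + mid + 1) hi)) := by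
        rw [solveA]
        rw [length_sub cs lo hi hr.2]
        have hgt' : ¬ hi - lo ≤ 1 := hgt
        simp only [hgt', if_false]
        rw [flag_eq_bScan cs lo hi ((hi - lo) / 2) hr.2 (by omega) 0, ← hmd, hb]
        simp only [Bool.not_false, if_true]
        rw [take_sub cs lo hi _ hmid, drop_sub cs lo hi]
      rw [ih hinv']
      simp only [List.all_cons, hsm]
      cases solveA (sub cs lo (lo + mid)) <;>
        cases solveA (sub cs (lo + mid + 1) hi) <;> simp

theorem sub_full (cs : List Char) : sub cs 0 cs.length = cs := by
  simp [sub]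

-- ===== VERDICT (by name: the statement is the Claim_ definition above) =====
theorem solve_spec : Claim_equal_solve := by
  intro paper _
  unfold Spec_solve solve solve_alt
  rw [bLoop_eq_all paper.toList [(0, paper.toList.length)]
      (by intro r hr; simp at hr; subst hr; simp)]
  simp only [List.all_cons, List.all_nil, Bool.and_true]
  rw [sub_full]
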